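-- pv_equiv track=rewrite | github.com/mikedee56/Post-Processing-Shruti | tests/data/test_data_manager.py | _apply_medium_corruptions
-- ===== SOURCE A (Python) =====
-- def _apply_medium_corruptions(text: str) -> str:
--     """Apply medium-level ASR corruptions to text."""
--     corruptions = [
--         ("krishna", "krsna"),
--         ("dharma", "dharama"),
--         ("yoga", "yog"),
--         ("chapter", "chaptor"),
--         ("verse", "vers")
--     ]
--
--     for original, corrupted in corruptions:
--         if original in text.lower():
--             text = text.replace(original, corrupted)
--
--     return text
-- ===== SOURCE B (Python) =====
-- def _apply_medium_corruptions(text: str) -> str: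
--     """Apply medium-level ASR corruptions in a single left-to-right scan."""
--     table = {"krishna": "krsna", "dharma": "dharama", "yoga": "yog",
--              "chapter": "chaptor", "verse": "vers"}
--     pieces = []
--     i = 0
--     while i < len(text):
--         for word, repl in table.items():
--             if text.startswith(word, i):
--                 pieces.append(repl)
--                 i += len(word)
--                 break
--         else:
--             pieces.append(text[i])
--             i += 1
--     return "".join(pieces)
-- ===== Notes on version B (the rewrite author's own statement) =====
-- stated objective: alternative
-- what changed: Replaces A's five sequential str.replace passes (each rescanning the whole string, plus a redundant lower() membership guard) with one left-to-right scan that emits the matching corruption at each position; valid because the five patterns start with five distinct letters occurring nowhere else in any pattern or replacement.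
import Mathlib
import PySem

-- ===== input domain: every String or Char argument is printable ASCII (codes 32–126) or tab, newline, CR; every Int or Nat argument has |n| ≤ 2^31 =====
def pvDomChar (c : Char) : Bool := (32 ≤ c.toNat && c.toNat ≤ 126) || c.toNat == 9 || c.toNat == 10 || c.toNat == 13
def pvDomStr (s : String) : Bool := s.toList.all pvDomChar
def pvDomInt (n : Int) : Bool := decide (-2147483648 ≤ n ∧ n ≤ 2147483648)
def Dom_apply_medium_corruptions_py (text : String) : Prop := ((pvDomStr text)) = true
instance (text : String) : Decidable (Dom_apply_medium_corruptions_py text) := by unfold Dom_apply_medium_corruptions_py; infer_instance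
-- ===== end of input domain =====

-- B replaces A's five sequential str.replace passes with one left-to-right scan emitting the
-- matching corruption at each position (objective: alternative — one pass instead of five).

-- ===== PORT A =====
-- A: for each (original, corrupted) pair in order, if original occurs in text.lower(),
-- text = text.replace(original, corrupted).  Literal transliteration as a fold over the pair list.
def apply_medium_corruptions_py (text : String) : String :=
  [("krishna", "krsna"), ("dharma", "dharama"), ("yoga", "yog"),
   ("chapter", "chaptor"), ("verse", "vers")].foldl
    (fun t p =>
      if PySem.Str.isIn p.1 (PySem.Str.lower t) then PySem.Str.replace t p.1 p.2 else t)
    text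

-- ===== PORT B =====
-- B's scan over the remaining characters: at each position try the pairs in order with
-- startswith; on a match emit the corruption and skip the original, else emit the char.
def pvScanB : List Char → List Char
  | [] => []
  | c :: t =>
    if "krishna".toList.isPrefixOf (c :: t) then "krsna".toList ++ pvScanB (t.drop 6)
    else if "dharma".toList.isPrefixOf (c :: t) then "dharama".toList ++ pvScanB (t.drop 5)
    else if "yoga".toList.isPrefixOf (c :: t) then "yog".toList ++ pvScanB (t.drop 3)
    else if "chapter".toList.isPrefixOf (c :: t) then "chaptor".toList ++ pvScanB (t.drop 6)
    else if "verse".toList.isPrefixOf (c :: t) then "vers".toList ++ pvScanB (t.drop 4)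
    else c :: pvScanB t
  termination_by l => l.length
  decreasing_by all_goals (simp [List.length_drop]; try omega)

def apply_medium_corruptions_py_alt (text : String) : String :=
  String.ofList (pvScanB text.toList)

-- ===== PRECONDITION & SPEC =====
def Spec_apply_medium_corruptions_py (text : String) (out : String) : Prop := out = apply_medium_corruptions_py_alt text
instance (text : String) (out : String) : Decidable (Spec_apply_medium_corruptions_py text out) := by unfold Spec_apply_medium_corruptions_py; infer_instance

-- ===== CLAIM (what is proved, stated in full; the proofs are below) =====
def Claim_equal_apply_medium_corruptions_py : Prop := ∀ (text : String), Dom_apply_medium_corruptions_py text → Spec_apply_medium_corruptions_py text (apply_medium_corruptions_py text)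

-- ===== LEMMAS AND PROOFS =====

-- A clean recursion equal to PySem.Chars.replace (for a nonempty pattern).
def pvRscan (o n : List Char) : List Char → List Char
  | [] => []
  | c :: t =>
    if o.isPrefixOf (c :: t) then n ++ pvRscan o n (t.drop (o.length - 1))
    else c :: pvRscan o n t
  termination_by l => l.length
  decreasing_by all_goals (simp [List.length_drop]; try omega)

theorem pvRscan_nil (o n : List Char) : pvRscan o n [] = [] := by simp [pvRscan]

theorem pvRscan_cons_pos (o n : List Char) (c : Char) (t : List Char)
    (hp : o.isPrefixOf (c :: t) = true) :
    pvRscan o n (c :: t) = n ++ pvRscan o n (t.drop (o.length - 1)) := by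
  rw [pvRscan]; simp [hp]

theorem pvRscan_cons_neg (o n : List Char) (c : Char) (t : List Char)
    (hp : o.isPrefixOf (c :: t) = false) :
    pvRscan o n (c :: t) = c :: pvRscan o n t := by
  rw [pvRscan]; simp [hp]

theorem pvGo_eq_rscan (o n : List Char) (ho : o ≠ []) :
    ∀ fuel l acc, l.length ≤ fuel →
      PySem.Chars.replace.go o n fuel l acc = acc.reverse ++ pvRscan o n l := by
  intro fuel
  induction fuel with
  | zero =>
    intro l acc h
    have : l = [] := List.eq_nil_of_length_eq_zero (Nat.le_zero.mp h)
    subst this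
    simp [PySem.Chars.replace.go, pvRscan_nil]
  | succ f ih =>
    intro l acc h
    match l with
    | [] => simp [PySem.Chars.replace.go, pvRscan_nil]
    | c :: t =>
      rw [PySem.Chars.replace.go]
      by_cases hp : o.isPrefixOf (c :: t) = true
      · simp only [hp, if_true]
        obtain ⟨u, o', rfl⟩ : ∃ u o', o = u :: o' := by
          cases o with
          | nil => exact absurd rfl ho
          | cons u o' => exact ⟨u, o', rfl⟩
        have hdrop : (c :: t).drop (u :: o').length = t.drop ((u :: o').length - 1) := by simp
        have hlen : ((c :: t).drop (u :: o').length).length ≤ f := by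
          simp only [List.length_drop, List.length_cons] at *
          omega
        rw [ih _ _ hlen, hdrop, pvRscan_cons_pos _ _ _ _ hp]
        simp
      · have hp' : o.isPrefixOf (c :: t) = false := by cases hb : o.isPrefixOf (c :: t) <;> simp_all
        simp only [hp', Bool.false_eq_true, if_false]
        have hlen : t.length ≤ f := by simp at h; omega
        rw [ih _ _ hlen, pvRscan_cons_neg _ _ _ _ hp']
        simp

theorem pvReplace_eq_rscan (o n l : List Char) (ho : o ≠ []) :
    PySem.Chars.replace l o n = pvRscan o n l := by
  rw [PySem.Chars.replace]
  have he : o.isEmpty = false := by cases o with | nil => exact absurd rfl ho | cons _ _ => rfl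
  rw [he]
  simpa using pvGo_eq_rscan o n ho l.length l [] le_rfl

-- If the pattern does not occur, the scan is the identity.
theorem pvRscan_id (o n : List Char) : ∀ l, ¬ o <:+: l → pvRscan o n l = l := by
  intro l
  induction l with
  | nil => intro _; exact pvRscan_nil o n
  | cons c t ih =>
    intro h
    have hp : o.isPrefixOf (c :: t) = false := by
      by_contra hc
      have hb : o.isPrefixOf (c :: t) = true := by cases hb : o.isPrefixOf (c :: t) <;> simp_all
      exact h ((List.isPrefixOf_iff_prefix.mp hb).isInfix)
    rw [pvRscan_cons_neg _ _ _ _ hp, ih (fun hi => h (List.infix_cons hi))]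

-- The scan skips over a block containing no occurrence of the pattern's first char.
theorem pvRscan_append (o n : List Char) (h : Char) (ho : o.head? = some h) :
    ∀ a x, h ∉ a → pvRscan o n (a ++ x) = a ++ pvRscan o n x := by
  intro a
  induction a with
  | nil => intro x _; rfl
  | cons b a' ih =>
    intro x hb
    obtain ⟨o', rfl⟩ : ∃ o', o = h :: o' := by
      cases o with
      | nil => simp at ho
      | cons u o' => simp at ho; exact ⟨o', by rw [ho]⟩
    have hbne : b ≠ h := fun he => hb (he ▸ List.mem_cons_self ..)
    have hp : (h :: o').isPrefixOf (b :: (a' ++ x)) = false := by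
      simp only [List.isPrefixOf, Bool.and_eq_false_iff]
      left
      simp [beq_eq_false_iff_ne]
      exact fun he => hbne he.symm
    rw [List.cons_append, pvRscan_cons_neg _ _ _ _ hp,
        ih x (fun hm => hb (List.mem_cons_of_mem _ hm))]
    simp

-- A match at the head is replaced.
theorem pvRscan_match (o n : List Char) (ho : o ≠ []) (t : List Char) :
    pvRscan o n (o ++ t) = n ++ pvRscan o n t := by
  obtain ⟨c, o', rfl⟩ : ∃ c o', o = c :: o' := by
    cases o with
    | nil => exact absurd rfl ho
    | cons c o' => exact ⟨c, o', rfl⟩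
  have hp : (c :: o').isPrefixOf (c :: (o' ++ t)) = true :=
    List.isPrefixOf_iff_prefix.mpr ⟨t, by simp⟩
  rw [List.cons_append, pvRscan_cons_pos _ _ _ _ hp]
  congr 2
  simp

-- The scan preserves whether a block avoiding the pattern's first char is a prefix
-- (pattern and replacement both start with h, h ∉ p).
theorem pvRscan_prefix (o n : List Char) (h : Char) (ho : o.head? = some h)
    (hn : n.head? = some h) :
    ∀ (l p : List Char), h ∉ p → p.isPrefixOf (pvRscan o n l) = p.isPrefixOf l := by
  obtain ⟨o', rfl⟩ : ∃ o', o = h :: o' := by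
    cases o with
    | nil => simp at ho
    | cons u o' => simp at ho; exact ⟨o', by rw [ho]⟩
  obtain ⟨n', rfl⟩ : ∃ n', n = h :: n' := by
    cases n with
    | nil => simp at hn
    | cons u n' => simp at hn; exact ⟨n', by rw [hn]⟩
  suffices H : ∀ N l, l.length ≤ N → ∀ p : List Char, h ∉ p →
      p.isPrefixOf (pvRscan (h :: o') (h :: n') l) = p.isPrefixOf l by
    exact fun l p hp => H l.length l le_rfl p hp
  intro N
  induction N with
  | zero =>
    intro l hl p hp
    have : l = [] := List.eq_nil_of_length_eq_zero (Nat.le_zero.mp hl)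
    subst this; rw [pvRscan_nil]
  | succ N ih =>
    intro l hl p hp
    match l with
    | [] => rw [pvRscan_nil]
    | c :: t =>
      by_cases hpre : (h :: o').isPrefixOf (c :: t) = true
      · have hc : c = h := by
          simp only [List.isPrefixOf, Bool.and_eq_true, beq_iff_eq] at hpre
          exact hpre.1.symm
        rw [pvRscan_cons_pos _ _ _ _ hpre]
        cases p with
        | nil => rfl
        | cons q p' =>
          have hq : q ≠ h := fun he => hp (he ▸ List.mem_cons_self ..)
          subst hc
          show (q :: p').isPrefixOf (c :: (n' ++ _)) = (q :: p').isPrefixOf (c :: t)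
          simp only [List.isPrefixOf]
          have : (q == c) = false := by simp [beq_eq_false_iff_ne]; exact hq
          simp [this]
      · have hpre' : (h :: o').isPrefixOf (c :: t) = false := by
          cases hb : (h :: o').isPrefixOf (c :: t) <;> simp_all
        rw [pvRscan_cons_neg _ _ _ _ hpre']
        cases p with
        | nil => rfl
        | cons q p' =>
          simp only [List.isPrefixOf]
          by_cases hqc : q = c
          · subst hqc
            simp only [BEq.rfl, Bool.true_and]
            have hlen : t.length ≤ N := by simp at hl; omega
            exact ih t hlen p' (fun hm => hp (List.mem_cons_of_mem _ hm))
          · have : (q == c) = false := by simp [beq_eq_false_iff_ne]; exact hqc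
            simp [this]

-- One guarded replace pass of A equals the plain scan (the lower() guard is redundant
-- for an all-lowercase nonempty pattern).
theorem pvPass_eq (o n : List Char) (ho : o ≠ [])
    (hlow : o.map PySem.Chars.lowerChar = o) (l : List Char) :
    (if PySem.Chars.isIn o (PySem.Chars.lower l) then PySem.Chars.replace l o n else l)
      = pvRscan o n l := by
  by_cases hin : PySem.Chars.isIn o (PySem.Chars.lower l) = true
  · rw [if_pos hin]; exact pvReplace_eq_rscan o n l ho
  · have hfalse : PySem.Chars.isIn o (PySem.Chars.lower l) = false := by
      cases hb : PySem.Chars.isIn o (PySem.Chars.lower l) <;> simp_all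
    rw [if_neg (by simp [hfalse])]
    refine (pvRscan_id o n l ?_).symm
    intro hi
    have hlo : o <:+: PySem.Chars.lower l := by
      have := hi.map PySem.Chars.lowerChar
      rwa [hlow] at this
    exact (PySem.Chars.isIn_eq_false_iff _ _).mp hfalse hlo

-- The five sequential scans equal B's single combined scan.
theorem pvMain : ∀ l : List Char,
    pvRscan "verse".toList "vers".toList
      (pvRscan "chapter".toList "chaptor".toList
        (pvRscan "yoga".toList "yog".toList
          (pvRscan "dharma".toList "dharama".toList
            (pvRscan "krishna".toList "krsna".toList l)))) = pvScanB l := by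
  suffices H : ∀ N, ∀ l : List Char, l.length ≤ N →
      pvRscan "verse".toList "vers".toList
        (pvRscan "chapter".toList "chaptor".toList
          (pvRscan "yoga".toList "yog".toList
            (pvRscan "dharma".toList "dharama".toList
              (pvRscan "krishna".toList "krsna".toList l)))) = pvScanB l by
    exact fun l => H l.length l le_rfl
  intro N
  induction N with
  | zero =>
    intro l h
    have : l = [] := List.eq_nil_of_length_eq_zero (Nat.le_zero.mp h)
    subst this
    simp [pvRscan_nil, pvScanB]
  | succ N ih =>
    intro l hlen
    match l with
    | [] => simp [pvRscan_nil, pvScanB]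
    | c :: t =>
      by_cases h1 : "krishna".toList.isPrefixOf (c :: t) = true
      · obtain ⟨t', ht'⟩ := List.isPrefixOf_iff_prefix.mp h1
        rw [← ht']
        have hlt : t'.length ≤ N := by
          have := congrArg List.length ht'
          simp at this hlen; omega
        rw [pvRscan_match _ _ (by decide),
            pvRscan_append "dharma".toList _ 'd' (by decide) _ _ (by decide),
            pvRscan_append "yoga".toList _ 'y' (by decide) _ _ (by decide),
            pvRscan_append "chapter".toList _ 'c' (by decide) _ _ (by decide),
            pvRscan_append "verse".toList _ 'v' (by decide) _ _ (by decide),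
            ih t' hlt]
        show _ = pvScanB ('k' :: 'r' :: 'i' :: 's' :: 'h' :: 'n' :: 'a' :: t')
        rw [pvScanB]
        simp [List.isPrefixOf]
      · have h1' : "krishna".toList.isPrefixOf (c :: t) = false := by
          cases hb : "krishna".toList.isPrefixOf (c :: t) <;> simp_all
        by_cases h2 : "dharma".toList.isPrefixOf (c :: t) = true
        · obtain ⟨t', ht'⟩ := List.isPrefixOf_iff_prefix.mp h2
          rw [← ht']
          have hlt : t'.length ≤ N := by
            have := congrArg List.length ht'
            simp at this hlen; omega
          rw [pvRscan_append "krishna".toList _ 'k' (by decide) _ _ (by decide),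
              pvRscan_match _ _ (by decide),
              pvRscan_append "yoga".toList _ 'y' (by decide) _ _ (by decide),
              pvRscan_append "chapter".toList _ 'c' (by decide) _ _ (by decide),
              pvRscan_append "verse".toList _ 'v' (by decide) _ _ (by decide),
              ih t' hlt]
          show _ = pvScanB ('d' :: 'h' :: 'a' :: 'r' :: 'm' :: 'a' :: t')
          rw [pvScanB]
          simp [List.isPrefixOf]
        · have h2' : "dharma".toList.isPrefixOf (c :: t) = false := by
            cases hb : "dharma".toList.isPrefixOf (c :: t) <;> simp_all
          by_cases h3 : "yoga".toList.isPrefixOf (c :: t) = true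
          · obtain ⟨t', ht'⟩ := List.isPrefixOf_iff_prefix.mp h3
            rw [← ht']
            have hlt : t'.length ≤ N := by
              have := congrArg List.length ht'
              simp at this hlen; omega
            rw [pvRscan_append "krishna".toList _ 'k' (by decide) _ _ (by decide),
                pvRscan_append "dharma".toList _ 'd' (by decide) _ _ (by decide),
                pvRscan_match _ _ (by decide),
                pvRscan_append "chapter".toList _ 'c' (by decide) _ _ (by decide),
                pvRscan_append "verse".toList _ 'v' (by decide) _ _ (by decide),
                ih t' hlt]
            show _ = pvScanB ('y' :: 'o' :: 'g' :: 'a' :: t')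
            rw [pvScanB]
            simp [List.isPrefixOf]
          · have h3' : "yoga".toList.isPrefixOf (c :: t) = false := by
              cases hb : "yoga".toList.isPrefixOf (c :: t) <;> simp_all
            by_cases h4 : "chapter".toList.isPrefixOf (c :: t) = true
            · obtain ⟨t', ht'⟩ := List.isPrefixOf_iff_prefix.mp h4
              rw [← ht']
              have hlt : t'.length ≤ N := by
                have := congrArg List.length ht'
                simp at this hlen; omega
              rw [pvRscan_append "krishna".toList _ 'k' (by decide) _ _ (by decide),
                  pvRscan_append "dharma".toList _ 'd' (by decide) _ _ (by decide),
                  pvRscan_append "yoga".toList _ 'y' (by decide) _ _ (by decide),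
                  pvRscan_match _ _ (by decide),
                  pvRscan_append "verse".toList _ 'v' (by decide) _ _ (by decide),
                  ih t' hlt]
              show _ = pvScanB ('c' :: 'h' :: 'a' :: 'p' :: 't' :: 'e' :: 'r' :: t')
              rw [pvScanB]
              simp [List.isPrefixOf]
            · have h4' : "chapter".toList.isPrefixOf (c :: t) = false := by
                cases hb : "chapter".toList.isPrefixOf (c :: t) <;> simp_all
              by_cases h5 : "verse".toList.isPrefixOf (c :: t) = true
              · obtain ⟨t', ht'⟩ := List.isPrefixOf_iff_prefix.mp h5
                rw [← ht']
                have hlt : t'.length ≤ N := by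
                  have := congrArg List.length ht'
                  simp at this hlen; omega
                rw [pvRscan_append "krishna".toList _ 'k' (by decide) _ _ (by decide),
                    pvRscan_append "dharma".toList _ 'd' (by decide) _ _ (by decide),
                    pvRscan_append "yoga".toList _ 'y' (by decide) _ _ (by decide),
                    pvRscan_append "chapter".toList _ 'c' (by decide) _ _ (by decide),
                    pvRscan_match _ _ (by decide),
                    ih t' hlt]
                show _ = pvScanB ('v' :: 'e' :: 'r' :: 's' :: 'e' :: t')
                rw [pvScanB]
                simp [List.isPrefixOf]
              · have h5' : "verse".toList.isPrefixOf (c :: t) = false := by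
                  cases hb : "verse".toList.isPrefixOf (c :: t) <;> simp_all
                have hlt : t.length ≤ N := by simp at hlen; omega
                have e1 : pvRscan "krishna".toList "krsna".toList (c :: t)
                    = c :: pvRscan "krishna".toList "krsna".toList t :=
                  pvRscan_cons_neg _ _ _ _ h1'
                have p2 : "dharma".toList.isPrefixOf
                    (pvRscan "krishna".toList "krsna".toList (c :: t)) = false := by
                  rw [pvRscan_prefix "krishna".toList "krsna".toList 'k' (by decide) (by decide)
                      (c :: t) "dharma".toList (by decide)]
                  exact h2'
                rw [e1] at p2
                have e2 : pvRscan "dharma".toList "dharama".toList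
                    (c :: pvRscan "krishna".toList "krsna".toList t)
                    = c :: pvRscan "dharma".toList "dharama".toList
                        (pvRscan "krishna".toList "krsna".toList t) :=
                  pvRscan_cons_neg _ _ _ _ p2
                have p3 : "yoga".toList.isPrefixOf
                    (pvRscan "dharma".toList "dharama".toList
                      (pvRscan "krishna".toList "krsna".toList (c :: t))) = false := by
                  rw [pvRscan_prefix "dharma".toList "dharama".toList 'd' (by decide) (by decide)
                      _ "yoga".toList (by decide),
                      pvRscan_prefix "krishna".toList "krsna".toList 'k' (by decide) (by decide)
                      _ "yoga".toList (by decide)]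
                  exact h3'
                rw [e1, e2] at p3
                have e3 : pvRscan "yoga".toList "yog".toList
                    (c :: pvRscan "dharma".toList "dharama".toList
                      (pvRscan "krishna".toList "krsna".toList t))
                    = c :: pvRscan "yoga".toList "yog".toList
                        (pvRscan "dharma".toList "dharama".toList
                          (pvRscan "krishna".toList "krsna".toList t)) :=
                  pvRscan_cons_neg _ _ _ _ p3
                have p4 : "chapter".toList.isPrefixOf
                    (pvRscan "yoga".toList "yog".toList
                      (pvRscan "dharma".toList "dharama".toList
                        (pvRscan "krishna".toList "krsna".toList (c :: t)))) = false := by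
                  rw [pvRscan_prefix "yoga".toList "yog".toList 'y' (by decide) (by decide)
                      _ "chapter".toList (by decide),
                      pvRscan_prefix "dharma".toList "dharama".toList 'd' (by decide) (by decide)
                      _ "chapter".toList (by decide),
                      pvRscan_prefix "krishna".toList "krsna".toList 'k' (by decide) (by decide)
                      _ "chapter".toList (by decide)]
                  exact h4'
                rw [e1, e2, e3] at p4
                have e4 : pvRscan "chapter".toList "chaptor".toList
                    (c :: pvRscan "yoga".toList "yog".toList
                      (pvRscan "dharma".toList "dharama".toList
                        (pvRscan "krishna".toList "krsna".toList t)))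
                    = c :: pvRscan "chapter".toList "chaptor".toList
                        (pvRscan "yoga".toList "yog".toList
                          (pvRscan "dharma".toList "dharama".toList
                            (pvRscan "krishna".toList "krsna".toList t))) :=
                  pvRscan_cons_neg _ _ _ _ p4
                have p5 : "verse".toList.isPrefixOf
                    (pvRscan "chapter".toList "chaptor".toList
                      (pvRscan "yoga".toList "yog".toList
                        (pvRscan "dharma".toList "dharama".toList
                          (pvRscan "krishna".toList "krsna".toList (c :: t))))) = false := by
                  rw [pvRscan_prefix "chapter".toList "chaptor".toList 'c' (by decide) (by decide)
                      _ "verse".toList (by decide),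
                      pvRscan_prefix "yoga".toList "yog".toList 'y' (by decide) (by decide)
                      _ "verse".toList (by decide),
                      pvRscan_prefix "dharma".toList "dharama".toList 'd' (by decide) (by decide)
                      _ "verse".toList (by decide),
                      pvRscan_prefix "krishna".toList "krsna".toList 'k' (by decide) (by decide)
                      _ "verse".toList (by decide)]
                  exact h5'
                rw [e1, e2, e3, e4] at p5
                have e5 := pvRscan_cons_neg "verse".toList "vers".toList _ _ p5
                have h1'' : ¬('k' = c ∧ (['r','i','s','h','n','a'] : List Char) <+: t) := by
                  rintro ⟨rfl, hpre⟩
                  have hx : "krishna".toList.isPrefixOf ('k' :: t) = true :=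
                    List.isPrefixOf_iff_prefix.mpr (by
                      rw [show "krishna".toList = ('k' :: ['r','i','s','h','n','a'] : List Char) from by decide]
                      exact List.cons_prefix_cons.mpr ⟨rfl, hpre⟩)
                  rw [h1'] at hx
                  exact Bool.false_ne_true hx
                have h2'' : ¬('d' = c ∧ (['h','a','r','m','a'] : List Char) <+: t) := by
                  rintro ⟨rfl, hpre⟩
                  have hx : "dharma".toList.isPrefixOf ('d' :: t) = true :=
                    List.isPrefixOf_iff_prefix.mpr (by
                      rw [show "dharma".toList = ('d' :: ['h','a','r','m','a'] : List Char) from by decide]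
                      exact List.cons_prefix_cons.mpr ⟨rfl, hpre⟩)
                  rw [h2'] at hx
                  exact Bool.false_ne_true hx
                have h3'' : ¬('y' = c ∧ (['o','g','a'] : List Char) <+: t) := by
                  rintro ⟨rfl, hpre⟩
                  have hx : "yoga".toList.isPrefixOf ('y' :: t) = true :=
                    List.isPrefixOf_iff_prefix.mpr (by
                      rw [show "yoga".toList = ('y' :: ['o','g','a'] : List Char) from by decide]
                      exact List.cons_prefix_cons.mpr ⟨rfl, hpre⟩)
                  rw [h3'] at hx
                  exact Bool.false_ne_true hx
                have h4'' : ¬('c' = c ∧ (['h','a','p','t','e','r'] : List Char) <+: t) := by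
                  rintro ⟨rfl, hpre⟩
                  have hx : "chapter".toList.isPrefixOf ('c' :: t) = true :=
                    List.isPrefixOf_iff_prefix.mpr (by
                      rw [show "chapter".toList = ('c' :: ['h','a','p','t','e','r'] : List Char) from by decide]
                      exact List.cons_prefix_cons.mpr ⟨rfl, hpre⟩)
                  rw [h4'] at hx
                  exact Bool.false_ne_true hx
                have h5'' : ¬('v' = c ∧ (['e','r','s','e'] : List Char) <+: t) := by
                  rintro ⟨rfl, hpre⟩
                  have hx : "verse".toList.isPrefixOf ('v' :: t) = true :=
                    List.isPrefixOf_iff_prefix.mpr (by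
                      rw [show "verse".toList = ('v' :: ['e','r','s','e'] : List Char) from by decide]
                      exact List.cons_prefix_cons.mpr ⟨rfl, hpre⟩)
                  rw [h5'] at hx
                  exact Bool.false_ne_true hx
                rw [e1, e2, e3, e4, e5, ih t hlt]
                rw [pvScanB]
                simp [h1'', h2'', h3'', h4'', h5'']

-- ===== VERDICT (by name: the statement is the Claim_ definition above) =====
theorem apply_medium_corruptions_py_spec : Claim_equal_apply_medium_corruptions_py := by
  intro text _
  show apply_medium_corruptions_py text = apply_medium_corruptions_py_alt text
  apply String.toList_inj.mp
  rw [apply_medium_corruptions_py_alt, String.toList_ofList, ← pvMain]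
  rw [apply_medium_corruptions_py]
  simp only [List.foldl]
  simp only [apply_ite String.toList, PySem.Str.toList_replace, PySem.Str.isIn_eq,
    PySem.Str.toList_lower]
  rw [pvPass_eq _ _ (by decide) (by decide), pvPass_eq _ _ (by decide) (by decide),
      pvPass_eq _ _ (by decide) (by decide), pvPass_eq _ _ (by decide) (by decide),
      pvPass_eq _ _ (by decide) (by decide)]
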